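-- pv_equiv track=rewrite | github.com/jet2230/videoShorts2 | shorts_creator.py | _get_theme_reason
-- ===== SOURCE A (Python) =====
-- def _get_theme_reason(text: str) -> str:
--     """Generate a reason for why this theme works as a short."""
--     text_lower = text.lower()
--
--     # Check for different engagement factors
--     if '?' in text:
--         return "Contains a thought-provoking question"
--     elif any(word in text_lower for word in ['story', 'imagine', 'believe']):
--         return "Narrative that engages viewers emotionally"
--     elif any(word in text_lower for word in ['important', 'remember', 'key', 'secret', 'lesson']):
--         return "Shares valuable knowledge viewers want to save"
--     elif any(word in text_lower for word in ['proof', 'evidence', 'hadith', 'verse']):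
--         return "Provides scriptural evidence that adds credibility"
--     elif any(word in text_lower for word in ['mistake', 'wrong', 'not permitted', 'should not']):
--         return "Addresses common misconceptions - high value content"
--     elif '!' in text:
--         return "Emotional delivery that creates impact"
--     elif any(word in text_lower for word in ['so', 'therefore', 'thus', 'this shows']):
--         return "Clear logical conclusion that's satisfying"
--     elif any(word in text_lower for word in ['allah', 'prophet', 'muhammad', 'god']):
--         return "Spiritual content that resonates with the audience"
--     else:
--         return "Self-contained segment with a clear message"
-- ===== SOURCE B (Python) =====
-- def _get_theme_reason(text: str) -> str:
--     """Generate a reason for why this theme works as a short."""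
--     text_lower = text.lower()
--     # (haystack, needles, reason) in priority order; '?'/'!' check the raw text.
--     rules = [
--         (text, ['?'], "Contains a thought-provoking question"),
--         (text_lower, ['story', 'imagine', 'believe'],
--          "Narrative that engages viewers emotionally"),
--         (text_lower, ['important', 'remember', 'key', 'secret', 'lesson'],
--          "Shares valuable knowledge viewers want to save"),
--         (text_lower, ['proof', 'evidence', 'hadith', 'verse'],
--          "Provides scriptural evidence that adds credibility"),
--         (text_lower, ['mistake', 'wrong', 'not permitted', 'should not'],
--          "Addresses common misconceptions - high value content"),
--         (text, ['!'], "Emotional delivery that creates impact"),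
--         (text_lower, ['so', 'therefore', 'thus', 'this shows'],
--          "Clear logical conclusion that's satisfying"),
--         (text_lower, ['allah', 'prophet', 'muhammad', 'god'],
--          "Spiritual content that resonates with the audience"),
--     ]
--     # Back-to-front sweep: start from the default and let every matching rule
--     # overwrite the answer; the last overwrite is the highest-priority match.
--     result = "Self-contained segment with a clear message"
--     for haystack, needles, reason in reversed(rules):
--         if any(n in haystack for n in needles):
--             result = reason
--     return result
-- ===== Notes on version B (the rewrite author's own statement) =====
-- stated objective: alternative
-- what changed: Replaces A's early-return if/elif chain by a back-to-front sweep over a uniform (haystack, needles, reason) table: B starts from the default and lets every matching rule overwrite the accumulator in reverse priority order, so the final value is the highest-priority match; it evaluates all rules instead of stopping at the first.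
import Mathlib
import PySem

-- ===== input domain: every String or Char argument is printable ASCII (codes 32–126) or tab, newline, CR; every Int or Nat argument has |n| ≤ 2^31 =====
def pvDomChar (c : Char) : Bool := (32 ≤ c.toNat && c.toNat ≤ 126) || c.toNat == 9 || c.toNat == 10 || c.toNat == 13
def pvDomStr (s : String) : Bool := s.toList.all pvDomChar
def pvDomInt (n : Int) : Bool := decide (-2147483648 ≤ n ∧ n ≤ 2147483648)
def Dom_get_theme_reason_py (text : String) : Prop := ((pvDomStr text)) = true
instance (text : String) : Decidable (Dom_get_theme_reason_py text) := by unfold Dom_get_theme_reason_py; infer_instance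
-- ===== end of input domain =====

-- ===== PORT A =====
-- B sweeps a uniform rule table back-to-front, overwriting a default accumulator (objective: alternative).
-- helper for A: any(word in text_lower for word in ws)
def pvAnyIn (ws : List String) (t : String) : Bool :=
  ws.any (fun w => PySem.Str.isIn w t)

def get_theme_reason_py (text : String) : String :=
  let text_lower := PySem.Str.lower text
  if PySem.Str.isIn "?" text then
    "Contains a thought-provoking question"
  else if pvAnyIn ["story", "imagine", "believe"] text_lower then
    "Narrative that engages viewers emotionally"
  else if pvAnyIn ["important", "remember", "key", "secret", "lesson"] text_lower then
    "Shares valuable knowledge viewers want to save"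
  else if pvAnyIn ["proof", "evidence", "hadith", "verse"] text_lower then
    "Provides scriptural evidence that adds credibility"
  else if pvAnyIn ["mistake", "wrong", "not permitted", "should not"] text_lower then
    "Addresses common misconceptions - high value content"
  else if PySem.Str.isIn "!" text then
    "Emotional delivery that creates impact"
  else if pvAnyIn ["so", "therefore", "thus", "this shows"] text_lower then
    "Clear logical conclusion that's satisfying"
  else if pvAnyIn ["allah", "prophet", "muhammad", "god"] text_lower then
    "Spiritual content that resonates with the audience"
  else
    "Self-contained segment with a clear message"

-- ===== PORT B =====
-- the back-to-front sweep: 'for haystack, needles, reason in reversed(rules): if any(...): result = reason'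
def pvSweep (rules : List (String × List String × String)) (init : String) : String :=
  rules.reverse.foldl
    (fun acc r => if r.2.1.any (fun n => PySem.Str.isIn n r.1) then r.2.2 else acc)
    init

def get_theme_reason_py_alt (text : String) : String :=
  let text_lower := PySem.Str.lower text
  let rules : List (String × List String × String) :=
    [ (text, ["?"], "Contains a thought-provoking question"),
      (text_lower, ["story", "imagine", "believe"],
        "Narrative that engages viewers emotionally"),
      (text_lower, ["important", "remember", "key", "secret", "lesson"],
        "Shares valuable knowledge viewers want to save"),
      (text_lower, ["proof", "evidence", "hadith", "verse"],
        "Provides scriptural evidence that adds credibility"),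
      (text_lower, ["mistake", "wrong", "not permitted", "should not"],
        "Addresses common misconceptions - high value content"),
      (text, ["!"], "Emotional delivery that creates impact"),
      (text_lower, ["so", "therefore", "thus", "this shows"],
        "Clear logical conclusion that's satisfying"),
      (text_lower, ["allah", "prophet", "muhammad", "god"],
        "Spiritual content that resonates with the audience") ]
  pvSweep rules "Self-contained segment with a clear message"

-- ===== PRECONDITION & SPEC =====
def Spec_get_theme_reason_py (text : String) (out : String) : Prop := out = get_theme_reason_py_alt text
instance (text : String) (out : String) : Decidable (Spec_get_theme_reason_py text out) := by unfold Spec_get_theme_reason_py; infer_instance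

-- ===== CLAIM (what is proved, stated in full; the proofs are below) =====
def Claim_equal_get_theme_reason_py : Prop := ∀ (text : String), Dom_get_theme_reason_py text → Spec_get_theme_reason_py text (get_theme_reason_py text)

-- ===== LEMMAS AND PROOFS =====

-- ===== VERDICT (by name: the statement is the Claim_ definition above) =====
theorem get_theme_reason_py_spec : Claim_equal_get_theme_reason_py := by
  intro text _
  unfold Spec_get_theme_reason_py get_theme_reason_py get_theme_reason_py_alt pvSweep pvAnyIn
  simp only [List.reverse_cons, List.reverse_nil, List.nil_append, List.cons_append,
    List.foldl_cons, List.foldl_nil, List.any_cons, List.any_nil]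
  split_ifs <;> simp_all
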